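-- pv_equiv track=rewrite | github.com/type-python/type-python | scripts/bump_version.py | update_cargo_lock
-- ===== SOURCE A (Python) =====
-- def update_cargo_lock(text: str, package_names: list[str], new_version: str) -> str:
--     lines = text.splitlines()
--     current_name: str | None = None
--     in_package = False
--     touched = set()
--
--     for index, line in enumerate(lines):
--         if line == "[[package]]":
--             current_name = None
--             in_package = True
--             continue
--         if in_package and line.startswith("name = "):
--             current_name = line.split('"')[1]
--             continue
--         if in_package and line.startswith("version = ") and current_name in package_names:
--             lines[index] = f'version = "{new_version}"'
--             touched.add(current_name)
--             continue
--         if in_package and line == "":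
--             in_package = False
--             current_name = None
--
--     missing = set(package_names) - touched
--     if missing:
--         raise SystemExit(f"unable to update Cargo.lock entries for: {', '.join(sorted(missing))}")
--     return "\n".join(lines) + "\n"
-- ===== SOURCE B (Python) =====
-- def update_cargo_lock(text: str, package_names: list[str], new_version: str) -> str:
--     lines = text.splitlines()
--
--     # stage 1: cut the line list into a preamble and one body per "[[package]]" marker
--     blocks = []
--     current = []
--     for line in lines:
--         if line == "[[package]]":
--             blocks.append(current)
--             current = []
--         else:
--             current.append(line)
--     blocks.append(current)
--
--     # stage 2: rewrite each body independently; its field region runs to the first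
--     # blank line, the rest of the body is copied verbatim
--     touched = set()
--
--     def fix_block(body):
--         cut = body.index("") if "" in body else len(body)
--         region, tail = body[:cut], body[cut:]
--         fixed = []
--         name = None
--         for fld in region:
--             if fld.startswith("name = "):
--                 name = fld.split('"')[1]
--                 fixed.append(fld)
--             elif fld.startswith("version = ") and name in package_names:
--                 fixed.append(f'version = "{new_version}"')
--                 touched.add(name)
--             else:
--                 fixed.append(fld)
--         return fixed + tail
--
--     # stage 3: reassemble
--     out = blocks[0]
--     for body in blocks[1:]:
--         out += ["[[package]]"] + fix_block(body)
--
--     missing = set(package_names) - touched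
--     if missing:
--         raise SystemExit(f"unable to update Cargo.lock entries for: {', '.join(sorted(missing))}")
--     return "\n".join(out) + "\n"
-- ===== Notes on version B (the rewrite author's own statement) =====
-- stated objective: alternative
-- what changed: B replaces A's single-pass flag-driven state machine (in_package/current_name with in-place index assignment) by three staged passes: split the line list into preamble + bodies at '[[package]]' markers, rewrite each body independently (field region found up-front via index('')), then concatenate the pieces back together.
import Mathlib
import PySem

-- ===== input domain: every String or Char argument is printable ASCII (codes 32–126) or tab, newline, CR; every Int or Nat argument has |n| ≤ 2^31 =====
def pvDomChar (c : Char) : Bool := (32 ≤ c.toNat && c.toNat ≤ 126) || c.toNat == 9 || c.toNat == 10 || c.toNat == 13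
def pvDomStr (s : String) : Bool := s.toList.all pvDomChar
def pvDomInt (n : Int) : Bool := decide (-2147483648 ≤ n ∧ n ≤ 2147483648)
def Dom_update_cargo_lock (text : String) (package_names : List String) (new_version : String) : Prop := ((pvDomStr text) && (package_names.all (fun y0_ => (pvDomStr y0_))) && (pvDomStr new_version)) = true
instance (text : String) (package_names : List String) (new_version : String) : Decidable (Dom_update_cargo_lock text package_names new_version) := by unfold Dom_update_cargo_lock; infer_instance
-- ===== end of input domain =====

-- B replaces A's flat flag-driven state machine by three staged passes: segment the line
-- list at '[[package]]' markers, rewrite each body independently, reassemble; same cost.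

-- ===== PORT A =====
-- A's loop body over (index, line); state = (lines, current_name, in_package, touched)
def pvStepA (package_names : List String) (new_version : String) :
    (List String × Option String × Bool × PySem.Set String) → Int × String →
    List String × Option String × Bool × PySem.Set String
  | (ls, current_name, in_package, touched), (index, line) =>
    if line = "[[package]]" then (ls, none, true, touched)
    else if in_package && PySem.Str.startswith line "name = " then
      -- line.split('"')[1]; IndexError (no '"' in line) is excluded by Pre_, so .getD "" never supplies the value
      (ls, some ((PySem.List.pyGet? ((PySem.Str.split? line "\"").getD []) 1).getD ""), in_package, touched)
    else if in_package && PySem.Str.startswith line "version = " &&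
            (match current_name with | some n => package_names.contains n | none => false) then
      match current_name with
      | some n => (PySem.List.pySetD ls index ("version = \"" ++ new_version ++ "\""), current_name, in_package, PySem.Set.add touched n)
      | none => (ls, current_name, in_package, touched)  -- unreachable: the guard requires current_name = some n
    else if in_package && line = "" then (ls, none, false, touched)
    else (ls, current_name, in_package, touched)

def update_cargo_lock (text : String) (package_names : List String) (new_version : String) : String :=
  -- 'missing = set(package_names) - touched; if missing: raise SystemExit(…)' — Pre_ excludes the raising inputs
  PySem.Str.join "\n"
    (((PySem.List.enumerate (PySem.Str.splitlines text) 0).foldl (pvStepA package_names new_version)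
      (PySem.Str.splitlines text, none, false, PySem.Set.empty)).1) ++ "\n"

-- ===== PORT B =====
-- stage 1 of Source B: cut the line list into preamble + one body per "[[package]]" marker
def pvSplitStep : (List (List String) × List String) → String → List (List String) × List String
  | (blocks, current), line =>
    if line = "[[package]]" then (blocks ++ [current], [])
    else (blocks, current ++ [line])

def pvBlocksOf (lines : List String) : List (List String) :=
  let r := lines.foldl pvSplitStep ([], [])
  r.1 ++ [r.2]

-- cut = body.index("") if "" in body else len(body)  (index? = none exactly when "" not in body)
def pvCut (body : List String) : Nat := (PySem.List.index? body "").getD body.length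

-- stage 2 of Source B: loop body of fix_block; state = (name, fixed, touched)
def pvFixStep (pns : List String) (nv : String) :
    (Option String × List String × PySem.Set String) → String →
    Option String × List String × PySem.Set String
  | (name, fixed, touched), fld =>
    if PySem.Str.startswith fld "name = " then
      -- fld.split('"')[1]; IndexError excluded by Pre_
      (some ((PySem.List.pyGet? ((PySem.Str.split? fld "\"").getD []) 1).getD ""), fixed ++ [fld], touched)
    else if PySem.Str.startswith fld "version = " &&
            (match name with | some n => pns.contains n | none => false) then
      match name with
      | some n => (name, fixed ++ ["version = \"" ++ nv ++ "\""], PySem.Set.add touched n)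
      | none => (name, fixed ++ [fld], touched)  -- unreachable: the guard requires name = some n
    else (name, fixed ++ [fld], touched)

-- fix_block(body): region, tail = body[:cut], body[cut:]  (0 ≤ cut ≤ len, so take/drop is exact)
def pvFixBlock (pns : List String) (nv : String) (body : List String) (touched : PySem.Set String) :
    List String × PySem.Set String :=
  let cut := pvCut body
  let r := (body.take cut).foldl (pvFixStep pns nv) (none, [], touched)
  (r.2.1 ++ body.drop cut, r.2.2)

def update_cargo_lock_alt (text : String) (package_names : List String) (new_version : String) : String :=
  -- stage 3: out = blocks[0]; for body in blocks[1:]: out += ["[[package]]"] + fix_block(body)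
  -- 'missing = set(package_names) - touched; if missing: raise SystemExit(…)' — Pre_ excludes the raising inputs
  let blocks := pvBlocksOf (PySem.Str.splitlines text)
  let r := (blocks.drop 1).foldl
    (fun (st : List String × PySem.Set String) body =>
      let f := pvFixBlock package_names new_version body st.2
      (st.1 ++ ["[[package]]"] ++ f.1, f.2))
    (blocks.headD [], PySem.Set.empty)
  PySem.Str.join "\n" r.1 ++ "\n"

-- ===== PRECONDITION & SPEC =====
-- one pass over the lines recording ((current name, inside a package), names whose version
-- line was rewritten, no in-package 'name = ' line without a '"' was hit)
def pvLockScan (package_names : List String) (lines : List String) :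
    (Option String × Bool) × PySem.Set String × Bool :=
  lines.foldl (fun st line =>
    match st with
    | ((cn, inp), touched, ok) =>
      if line = "[[package]]" then ((none, true), touched, ok)
      else if inp && PySem.Str.startswith line "name = " then
        ((some ((PySem.List.pyGet? ((PySem.Str.split? line "\"").getD []) 1).getD ""), inp), touched,
          ok && PySem.Str.isIn "\"" line)
      else if inp && PySem.Str.startswith line "version = " then
        (match cn with
         | some n => if package_names.contains n then ((cn, inp), PySem.Set.add touched n, ok)
                     else ((cn, inp), touched, ok)
         | none => ((cn, inp), touched, ok))
      else if inp && line = "" then ((none, false), touched, ok)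
      else ((cn, inp), touched, ok)) ((none, false), PySem.Set.empty, true)

-- Pre_ = exactly the inputs on which A returns: no IndexError (an in-package 'name = ' line
-- without a '"'), and every requested package name had a version line rewritten (otherwise
-- A raises SystemExit)
def Pre_update_cargo_lock (text : String) (package_names : List String) (new_version : String) : Prop :=
  (pvLockScan package_names (PySem.Str.splitlines text)).2.2 = true ∧
  ∀ n ∈ package_names, PySem.Set.contains (pvLockScan package_names (PySem.Str.splitlines text)).2.1 n = true

instance (text : String) (package_names : List String) (new_version : String) : Decidable (Pre_update_cargo_lock text package_names new_version) := by unfold Pre_update_cargo_lock; infer_instance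

def pvWitness_update_cargo_lock : String × List String × String :=
  ("[[package]]\nname = \"a\"\nversion = \"0\"", ["a"], "9")

def Spec_update_cargo_lock (text : String) (package_names : List String) (new_version : String) (out : String) : Prop := out = update_cargo_lock_alt text package_names new_version
instance (text : String) (package_names : List String) (new_version : String) (out : String) : Decidable (Spec_update_cargo_lock text package_names new_version out) := by unfold Spec_update_cargo_lock; infer_instance

-- ===== CLAIM (what is proved, stated in full; the proofs are below) =====
def Claim_equal_update_cargo_lock : Prop := ∀ (text : String) (package_names : List String) (new_version : String), Dom_update_cargo_lock text package_names new_version → Pre_update_cargo_lock text package_names new_version → Spec_update_cargo_lock text package_names new_version (update_cargo_lock text package_names new_version)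

-- ===== LEMMAS AND PROOFS =====

-- Proof-side line-by-line scan bridging A's flat machine and B's staged passes:
-- outer = outside a package block, inner = inside one (name = current name state)
mutual
def pvOuterB (pns : List String) (nv : String) (ls : List String)
    (touched : PySem.Set String) : List String × PySem.Set String :=
  match ls with
  | [] => ([], touched)
  | line :: rest =>
    if line = "[[package]]" then
      let r := pvInnerB pns nv none rest touched
      (line :: r.1, r.2)
    else
      let r := pvOuterB pns nv rest touched
      (line :: r.1, r.2)

def pvInnerB (pns : List String) (nv : String) (name : Option String) (ls : List String)
    (touched : PySem.Set String) : List String × PySem.Set String :=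
  match ls with
  | [] => ([], touched)
  | fld :: rest =>
    if fld = "[[package]]" then
      let r := pvInnerB pns nv none rest touched
      (fld :: r.1, r.2)
    else if fld = "" then
      let r := pvOuterB pns nv rest touched
      (fld :: r.1, r.2)
    else if PySem.Str.startswith fld "name = " then
      let r := pvInnerB pns nv (some ((PySem.List.pyGet? ((PySem.Str.split? fld "\"").getD []) 1).getD "")) rest touched
      (fld :: r.1, r.2)
    else
      match name with
      | some n =>
        if PySem.Str.startswith fld "version = " && pns.contains n then
          let r := pvInnerB pns nv (some n) rest (PySem.Set.add touched n)
          (("version = \"" ++ nv ++ "\"") :: r.1, r.2)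
        else
          let r := pvInnerB pns nv (some n) rest touched
          (fld :: r.1, r.2)
      | none =>
        let r := pvInnerB pns nv none rest touched
        (fld :: r.1, r.2)
end

-- final (current_name, in_package) of A's machine over a suffix of the lines
def pvEnd : (Option String × Bool) → List String → Option String × Bool
  | st, [] => st
  | st, line :: rest =>
    pvEnd (if line = "[[package]]" then (none, true)
      else if st.2 && PySem.Str.startswith line "name = " then
        (some ((PySem.List.pyGet? ((PySem.Str.split? line "\"").getD []) 1).getD ""), st.2)
      else if st.2 && line = "" then (none, false)
      else st) rest

lemma pvOuterB_cons (pns : List String) (nv line : String) (rest : List String)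
    (t : PySem.Set String) :
    pvOuterB pns nv (line :: rest) t =
      if line = "[[package]]" then
        (line :: (pvInnerB pns nv none rest t).1, (pvInnerB pns nv none rest t).2)
      else (line :: (pvOuterB pns nv rest t).1, (pvOuterB pns nv rest t).2) := by
  rw [pvOuterB.eq_def]

lemma pvInnerB_cons (pns : List String) (nv : String) (name : Option String) (fld : String)
    (rest : List String) (t : PySem.Set String) :
    pvInnerB pns nv name (fld :: rest) t =
      if fld = "[[package]]" then
        (fld :: (pvInnerB pns nv none rest t).1, (pvInnerB pns nv none rest t).2)
      else if fld = "" then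
        (fld :: (pvOuterB pns nv rest t).1, (pvOuterB pns nv rest t).2)
      else if PySem.Str.startswith fld "name = " then
        (fld :: (pvInnerB pns nv (some ((PySem.List.pyGet? ((PySem.Str.split? fld "\"").getD []) 1).getD "")) rest t).1,
         (pvInnerB pns nv (some ((PySem.List.pyGet? ((PySem.Str.split? fld "\"").getD []) 1).getD "")) rest t).2)
      else
        match name with
        | some n =>
          if PySem.Str.startswith fld "version = " && pns.contains n then
            (("version = \"" ++ nv ++ "\"") :: (pvInnerB pns nv (some n) rest (PySem.Set.add t n)).1,
             (pvInnerB pns nv (some n) rest (PySem.Set.add t n)).2)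
          else (fld :: (pvInnerB pns nv (some n) rest t).1, (pvInnerB pns nv (some n) rest t).2)
        | none => (fld :: (pvInnerB pns nv none rest t).1, (pvInnerB pns nv none rest t).2) := by
  rw [pvInnerB.eq_def]

lemma set_append_cons (full : List String) (x v : String) (rest : List String) :
    (full ++ x :: rest).set full.length v = full ++ v :: rest := by
  induction full with
  | nil => rfl
  | cons a t ih => simpa using ih

lemma pySetD_append_cons (full : List String) (x v : String) (rest : List String) :
    PySem.List.pySetD (full ++ x :: rest) ((full.length : Nat) : Int) v = full ++ v :: rest := by
  rw [PySem.List.pySetD_natCast, set_append_cons]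

-- the heart of A's side: A's fold over an enumerated suffix equals the line-by-line scan
lemma foldA_eq_B (pns : List String) (nv : String) :
    ∀ (ls full : List String) (cn : Option String) (inp : Bool) (touched : PySem.Set String),
    (PySem.List.enumerate ls (full.length : Int)).foldl (pvStepA pns nv) (full ++ ls, cn, inp, touched)
      = (full ++ (if inp then pvInnerB pns nv cn ls touched
                  else pvOuterB pns nv ls touched).1,
         (pvEnd (cn, inp) ls).1, (pvEnd (cn, inp) ls).2,
         (if inp then pvInnerB pns nv cn ls touched
          else pvOuterB pns nv ls touched).2) := by
  intro ls
  induction ls with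
  | nil => intro full cn inp touched; cases inp <;> simp [pvOuterB, pvInnerB, pvEnd]
  | cons x rest ih =>
    intro full cn inp touched
    have hlen : ∀ y : String, (((full ++ [y]).length : Nat) : Int) = ((full.length : Nat) : Int) + 1 := by
      intro y; simp
    rw [PySem.List.enumerate_cons, List.foldl_cons]
    by_cases h1 : x = "[[package]]"
    · subst h1
      have := ih (full ++ ["[[package]]"]) none true touched
      rw [hlen _] at this
      simp only [List.append_assoc, List.cons_append, List.nil_append] at this
      cases inp <;>
        simp [pvStepA, pvOuterB, pvInnerB, pvEnd, this]
    · cases inp with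
      | false =>
        have := ih (full ++ [x]) cn false touched
        rw [hlen _] at this
        simp only [List.append_assoc, List.cons_append, List.nil_append] at this
        simp [pvStepA, pvOuterB, pvEnd, h1, this]
      | true =>
        by_cases h3 : PySem.Str.startswith x "name = " = true
        · have hne : x ≠ "" := fun he => by rw [he] at h3; exact absurd h3 (by decide)
          simp at h3
          have := ih (full ++ [x]) (some ((PySem.List.pyGet? ((PySem.Str.split? x "\"").getD []) 1).getD "")) true touched
          rw [hlen _] at this
          simp only [List.append_assoc, List.cons_append, List.nil_append] at this
          simp [pvStepA, pvInnerB, pvEnd, h1, h3, hne, this]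
        · simp at h3
          by_cases h2 : x = ""
          · subst h2
            have := ih (full ++ [""]) none false touched
            rw [hlen _] at this
            simp only [List.append_assoc, List.cons_append, List.nil_append] at this
            simp [pvStepA, pvInnerB, pvOuterB, pvEnd, h1, h3, this,
              (by decide : PySem.Chars.startswith ([] : List Char) ['n','a','m','e',' ','=',' '] = false),
              (by decide : PySem.Chars.startswith ([] : List Char) ['v','e','r','s','i','o','n',' ','=',' '] = false)]
          · cases cn with
            | none =>
              have := ih (full ++ [x]) none true touched
              rw [hlen _] at this
              simp only [List.append_assoc, List.cons_append, List.nil_append] at this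
              simp [pvStepA, pvInnerB, pvEnd, h1, h2, h3, this]
            | some n =>
              by_cases hv : PySem.Str.startswith x "version = " = true
              · simp at hv
                by_cases hc : n ∈ pns
                · have := ih (full ++ ["version = \"" ++ nv ++ "\""]) (some n) true (PySem.Set.add touched n)
                  rw [hlen _] at this
                  simp only [List.append_assoc, List.cons_append, List.nil_append] at this
                  simp [pvStepA, pvInnerB, pvEnd, h1, h2, h3, hv, hc,
                    pySetD_append_cons, this]
                · have := ih (full ++ [x]) (some n) true touched
                  rw [hlen _] at this
                  simp only [List.append_assoc, List.cons_append, List.nil_append] at this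
                  simp [pvStepA, pvInnerB, pvEnd, h1, h2, h3, hv, hc, this]
              · simp at hv
                have := ih (full ++ [x]) (some n) true touched
                rw [hlen _] at this
                simp only [List.append_assoc, List.cons_append, List.nil_append] at this
                simp [pvStepA, pvInnerB, pvEnd, h1, h2, h3, hv, this]

-- ===== B side: relate the staged passes to the line-by-line scan =====

-- recursive characterization of stage 1
def pvBlocksR : List String → List (List String)
  | [] => [[]]
  | l :: rest =>
    if l = "[[package]]" then [] :: pvBlocksR rest
    else match pvBlocksR rest with
      | b :: bs => (l :: b) :: bs
      | [] => [[l]]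

lemma pvBlocksR_cons_shape (ls : List String) : ∃ b bs, pvBlocksR ls = b :: bs := by
  cases ls with
  | nil => exact ⟨[], [], rfl⟩
  | cons l rest =>
    by_cases h : l = "[[package]]"
    · exact ⟨[], pvBlocksR rest, by simp [pvBlocksR, h]⟩
    · rcases hb : pvBlocksR rest with _ | ⟨b, bs⟩
      · exact ⟨[l], [], by simp [pvBlocksR, h, hb]⟩
      · exact ⟨l :: b, bs, by simp [pvBlocksR, h, hb]⟩

lemma blocks_fold (ls : List String) : ∀ (bs : List (List String)) (cur : List String),
    (ls.foldl pvSplitStep (bs, cur)).1 ++ [(ls.foldl pvSplitStep (bs, cur)).2]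
      = bs ++ (match pvBlocksR ls with
               | b :: t => (cur ++ b) :: t
               | [] => [cur]) := by
  induction ls with
  | nil => intro bs cur; simp [pvBlocksR]
  | cons l rest ih =>
    intro bs cur
    by_cases h : l = "[[package]]"
    · rw [List.foldl_cons]
      simp only [pvSplitStep, h, if_pos rfl]
      rw [ih]
      obtain ⟨b, t, hb⟩ := pvBlocksR_cons_shape rest
      simp [pvBlocksR, h, hb]
    · rw [List.foldl_cons]
      simp only [pvSplitStep, if_neg h]
      rw [ih]
      obtain ⟨b, t, hb⟩ := pvBlocksR_cons_shape rest
      simp [pvBlocksR, h, hb]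

lemma pvBlocksOf_eq (ls : List String) : pvBlocksOf ls = pvBlocksR ls := by
  unfold pvBlocksOf
  have := blocks_fold ls [] []
  simp only [List.nil_append] at this
  rw [this]
  obtain ⟨b, t, hb⟩ := pvBlocksR_cons_shape ls
  simp [hb]

-- cut-point unfolding
lemma pvCut_nil : pvCut [] = 0 := by decide

lemma pvCut_cons_blank (xs : List String) : pvCut ("" :: xs) = 0 := by
  rw [pvCut, PySem.List.index?_cons_self]; rfl

lemma pvCut_cons_ne (x : String) (xs : List String) (h : x ≠ "") :
    pvCut (x :: xs) = pvCut xs + 1 := by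
  rw [pvCut, pvCut, PySem.List.index?_cons_of_ne _ h]
  cases hix : PySem.List.index? xs "" with
  | none => simp [hix]
  | some k => simp [hix]

-- recursive characterization of fix_block's region loop (name state threaded)
def pvFixRegion (pns : List String) (nv : String) :
    Option String → List String → PySem.Set String → List String × PySem.Set String
  | _, [], t => ([], t)
  | n, x :: xs, t =>
    if PySem.Str.startswith x "name = " then
      let r := pvFixRegion pns nv (some ((PySem.List.pyGet? ((PySem.Str.split? x "\"").getD []) 1).getD "")) xs t
      (x :: r.1, r.2)
    else if PySem.Str.startswith x "version = " &&
            (match n with | some m => pns.contains m | none => false) then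
      match n with
      | some m =>
        let r := pvFixRegion pns nv (some m) xs (PySem.Set.add t m)
        (("version = \"" ++ nv ++ "\"") :: r.1, r.2)
      | none =>
        let r := pvFixRegion pns nv none xs t
        (x :: r.1, r.2)
    else
      let r := pvFixRegion pns nv n xs t
      (x :: r.1, r.2)

lemma fix_fold_eq_region (pns : List String) (nv : String) :
    ∀ (xs : List String) (n : Option String) (pre : List String) (t : PySem.Set String),
    (xs.foldl (pvFixStep pns nv) (n, pre, t)).2
      = (pre ++ (pvFixRegion pns nv n xs t).1, (pvFixRegion pns nv n xs t).2) := by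
  intro xs
  induction xs with
  | nil => intro n pre t; simp [pvFixRegion]
  | cons x rest ih =>
    intro n pre t
    rw [List.foldl_cons]
    by_cases h1 : PySem.Str.startswith x "name = " = true
    · have h1' := h1; simp at h1'
      simp only [pvFixStep, h1, if_pos rfl]
      rw [ih]
      simp [pvFixRegion, h1']
    · simp only [Bool.not_eq_true] at h1
      have h1' := h1; simp at h1'
      by_cases h2 : (PySem.Str.startswith x "version = " &&
          (match n with | some m => pns.contains m | none => false)) = true
      · cases n with
        | none => simp at h2
        | some m =>
          have h2' := h2; simp at h2'
          simp only [pvFixStep, h1, Bool.false_eq_true, if_false, h2, if_pos rfl]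
          rw [ih]
          simp [pvFixRegion, h1', h2']
      · simp only [Bool.not_eq_true] at h2
        simp only [pvFixStep, h1, Bool.false_eq_true, if_false, h2, if_false]
        rw [ih]
        cases n with
        | none => simp [pvFixRegion, h1']
        | some m =>
          by_cases hvs : PySem.Str.startswith x "version = " = true
          · have hm : m ∉ pns := by
              rw [hvs] at h2; simpa using h2
            have hvs' := hvs; simp at hvs'
            simp [pvFixRegion, h1', hvs', hm]
          · have hvs' : PySem.Str.startswith x "version = " = false := by simpa using hvs
            have hvs'' := hvs'; simp at hvs''
            simp [pvFixRegion, h1', hvs'']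

-- fix_block with an arbitrary starting name, in recursive-region form
def pvFixF (pns : List String) (nv : String) (n : Option String) (body : List String)
    (t : PySem.Set String) : List String × PySem.Set String :=
  let cut := pvCut body
  let r := pvFixRegion pns nv n (body.take cut) t
  (r.1 ++ body.drop cut, r.2)

lemma pvFixBlock_eq (pns : List String) (nv : String) (body : List String) (t : PySem.Set String) :
    pvFixBlock pns nv body t = pvFixF pns nv none body t := by
  simp only [pvFixBlock, pvFixF, fix_fold_eq_region, List.nil_append]

-- recursive characterization of stage 3
def pvJoinBodies (pns : List String) (nv : String) :
    List (List String) → PySem.Set String → List String × PySem.Set String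
  | [], t => ([], t)
  | b :: bs, t =>
    let f := pvFixF pns nv none b t
    let r := pvJoinBodies pns nv bs f.2
    ("[[package]]" :: (f.1 ++ r.1), r.2)

lemma join_fold (pns : List String) (nv : String) :
    ∀ (bodies : List (List String)) (p : List String × PySem.Set String),
    bodies.foldl (fun (st : List String × PySem.Set String) body =>
        let f := pvFixBlock pns nv body st.2
        (st.1 ++ ["[[package]]"] ++ f.1, f.2)) p
      = (p.1 ++ (pvJoinBodies pns nv bodies p.2).1, (pvJoinBodies pns nv bodies p.2).2) := by
  intro bodies
  induction bodies with
  | nil => intro p; simp [pvJoinBodies]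
  | cons b bs ih =>
    intro p
    rw [List.foldl_cons, ih]
    simp [pvJoinBodies, pvFixBlock_eq]

-- assembling the whole output from the block list, starting outside / inside a block
def pvAssemble (pns : List String) (nv : String) (blocks : List (List String))
    (t : PySem.Set String) : List String × PySem.Set String :=
  match blocks with
  | [] => ([], t)
  | pre :: bodies =>
    let r := pvJoinBodies pns nv bodies t
    (pre ++ r.1, r.2)

def pvAssembleIn (pns : List String) (nv : String) (n : Option String)
    (blocks : List (List String)) (t : PySem.Set String) : List String × PySem.Set String :=
  match blocks with
  | [] => ([], t)
  | b :: bodies =>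
    let f := pvFixF pns nv n b t
    let r := pvJoinBodies pns nv bodies f.2
    (f.1 ++ r.1, r.2)

-- the bridge: the line-by-line scan equals the staged block processing
lemma scan_eq_staged (pns : List String) (nv : String) (ls : List String) :
    (∀ t, pvOuterB pns nv ls t = pvAssemble pns nv (pvBlocksR ls) t) ∧
    (∀ n t, pvInnerB pns nv n ls t = pvAssembleIn pns nv n (pvBlocksR ls) t) := by
  induction ls with
  | nil =>
    constructor
    · intro t
      rw [pvOuterB.eq_def]
      simp [pvBlocksR, pvAssemble, pvJoinBodies]
    · intro n t
      rw [pvInnerB.eq_def]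
      simp [pvBlocksR, pvAssembleIn, pvFixF, pvCut_nil, pvFixRegion, pvJoinBodies]
  | cons x rest ih =>
    obtain ⟨b0, bs, hb⟩ := pvBlocksR_cons_shape rest
    by_cases h1 : x = "[[package]]"
    · subst h1
      constructor
      · intro t
        rw [pvOuterB_cons, if_pos rfl, ih.2 none t]
        simp [pvBlocksR, hb, pvAssemble, pvAssembleIn, pvJoinBodies, pvFixF, pvCut_nil, pvFixRegion]
      · intro n t
        rw [pvInnerB_cons, if_pos rfl, ih.2 none t]
        simp [pvBlocksR, hb, pvAssembleIn, pvJoinBodies, pvFixF, pvCut_nil, pvFixRegion]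
    · have houter : ∀ t, pvOuterB pns nv (x :: rest) t
          = pvAssemble pns nv (pvBlocksR (x :: rest)) t := by
        intro t
        rw [pvOuterB_cons, if_neg h1, ih.1 t]
        simp [pvBlocksR, h1, hb, pvAssemble]
      refine ⟨houter, ?_⟩
      intro n t
      rw [pvInnerB_cons, if_neg h1]
      by_cases h2 : x = ""
      · subst h2
        rw [if_pos rfl, ih.1 t]
        simp [pvBlocksR, h1, hb, pvAssemble, pvAssembleIn, pvFixF, pvCut_cons_blank, pvFixRegion,
          pvJoinBodies]
      · rw [if_neg h2]
        by_cases h3 : PySem.Str.startswith x "name = " = true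
        · have h3' := h3; simp at h3'
          rw [if_pos h3, ih.2 (some ((PySem.List.pyGet? ((PySem.Str.split? x "\"").getD []) 1).getD "")) t]
          simp [pvBlocksR, h1, h2, hb, pvAssembleIn, pvFixF, pvCut_cons_ne x b0 h2, pvFixRegion, h3']
        · have h3' : PySem.Str.startswith x "name = " = false := by simpa using h3
          have h3'' := h3'; simp at h3''
          rw [if_neg h3]
          cases n with
          | none =>
            rw [ih.2 none t]
            simp [pvBlocksR, h1, h2, hb, pvAssembleIn, pvFixF, pvCut_cons_ne x b0 h2, pvFixRegion, h3'']
          | some m =>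
            dsimp only
            rw [ih.2 (some m) (PySem.Set.add t m), ih.2 (some m) t]
            by_cases hvs : PySem.Str.startswith x "version = " = true
            · have hvs' := hvs; simp at hvs'
              by_cases hm : m ∈ pns
              · simp [pvBlocksR, h1, h2, hb, pvAssembleIn, pvFixF, pvCut_cons_ne x b0 h2,
                  pvFixRegion, h3'', hvs', hm]
              · simp [pvBlocksR, h1, h2, hb, pvAssembleIn, pvFixF, pvCut_cons_ne x b0 h2,
                  pvFixRegion, h3'', hvs', hm]
            · have hvs' : PySem.Str.startswith x "version = " = false := by simpa using hvs
              have hvs'' := hvs'; simp at hvs''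
              simp [pvBlocksR, h1, h2, hb, pvAssembleIn, pvFixF, pvCut_cons_ne x b0 h2,
                pvFixRegion, h3'', hvs'']

theorem update_cargo_lock_spec : Claim_equal_update_cargo_lock := by
  intro text pns nv _ _
  unfold Spec_update_cargo_lock update_cargo_lock update_cargo_lock_alt
  have h := foldA_eq_B pns nv (PySem.Str.splitlines text) [] none false PySem.Set.empty
  simp only [List.nil_append, List.length_nil, Nat.cast_zero, Bool.false_eq_true, if_false] at h
  rw [h, pvBlocksOf_eq,
    (scan_eq_staged pns nv (PySem.Str.splitlines text)).1 PySem.Set.empty]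
  obtain ⟨pre, bodies, hb⟩ := pvBlocksR_cons_shape (PySem.Str.splitlines text)
  rw [hb]
  simp only [pvAssemble, List.headD_cons, List.drop_succ_cons, List.drop_zero]
  rw [join_fold pns nv bodies (pre, PySem.Set.empty)]
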